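-- pv_equiv track=rewrite | github.com/Hernan-Hamra/argos | tools/parsear_respuesta.py | _buscar_expresion
-- ===== SOURCE A (Python) =====
-- def _buscar_expresion(texto, expresiones):
--     """Busca la expresión más larga que matchee en el texto."""
--     texto_lower = texto.lower()
--     mejor = None
--     mejor_len = 0
--     for expr, val in expresiones.items():
--         if expr in texto_lower and len(expr) > mejor_len:
--             mejor = val
--             mejor_len = len(expr)
--     return mejor
-- ===== SOURCE B (Python) =====
-- def _buscar_expresion(texto, expresiones):
--     """Two-pass: compute the longest matching length with max(), then return the
--     first expression of that length that matches (no best-so-far accumulator)."""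
--     t = texto.lower()
--     m = max((len(e) for e in expresiones if e in t), default=0)
--     if m == 0:
--         return None
--     for e, v in expresiones.items():
--         if len(e) == m and e in t:
--             return v
-- ===== Notes on version B (the rewrite author's own statement) =====
-- stated objective: simpler
-- what changed: Replaces A's single-pass best-so-far accumulator loop by two passes: the longest matching length is computed with max() over a generator, then the first expression of that length that matches is returned directly.
import Mathlib
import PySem

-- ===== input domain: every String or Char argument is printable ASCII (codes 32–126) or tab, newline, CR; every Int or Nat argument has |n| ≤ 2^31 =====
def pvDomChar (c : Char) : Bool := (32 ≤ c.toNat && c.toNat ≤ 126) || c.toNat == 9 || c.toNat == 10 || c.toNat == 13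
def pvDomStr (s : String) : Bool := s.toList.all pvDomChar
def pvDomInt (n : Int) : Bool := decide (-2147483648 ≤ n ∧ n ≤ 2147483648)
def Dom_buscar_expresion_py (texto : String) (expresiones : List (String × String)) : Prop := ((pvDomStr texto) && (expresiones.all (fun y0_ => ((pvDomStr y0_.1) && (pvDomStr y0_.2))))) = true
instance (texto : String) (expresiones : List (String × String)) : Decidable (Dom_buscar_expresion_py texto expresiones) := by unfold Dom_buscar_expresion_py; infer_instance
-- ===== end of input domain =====

-- B replaces A's best-so-far accumulator loop by two passes (max matching length via max(), then first expression of that length); objective: simpler, not faster.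

-- ===== PORT A =====
def buscar_expresion_py (texto : String) (expresiones : List (String × String)) : Option String :=
  let texto_lower := PySem.Str.lower texto
  ((PySem.Dict.ofList expresiones).items.foldl
    (fun (st : Option String × Int) p =>
      if PySem.Str.isIn p.1 texto_lower ∧ st.2 < PySem.Str.len p.1
      then (some p.2, PySem.Str.len p.1)
      else st)
    (none, 0)).1

-- ===== PORT B =====
def buscar_expresion_py_alt (texto : String) (expresiones : List (String × String)) : Option String :=
  let t := PySem.Str.lower texto
  let d := PySem.Dict.ofList expresiones
  let m := PySem.List.maxD ((d.keys.filter (fun e => PySem.Str.isIn e t)).map PySem.Str.len) id 0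
  if m = 0 then none
  else (d.items.find? (fun p => PySem.Str.len p.1 == m && PySem.Str.isIn p.1 t)).map (fun p => p.2)

-- ===== PRECONDITION & SPEC =====
def Spec_buscar_expresion_py (texto : String) (expresiones : List (String × String)) (out : Option String) : Prop := out = buscar_expresion_py_alt texto expresiones
instance (texto : String) (expresiones : List (String × String)) (out : Option String) : Decidable (Spec_buscar_expresion_py texto expresiones out) := by unfold Spec_buscar_expresion_py; infer_instance

-- ===== CLAIM (what is proved, stated in full; the proofs are below) =====
def Claim_equal_buscar_expresion_py : Prop := ∀ (texto : String) (expresiones : List (String × String)), Dom_buscar_expresion_py texto expresiones → Spec_buscar_expresion_py texto expresiones (buscar_expresion_py texto expresiones)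

-- ===== LEMMAS AND PROOFS =====

-- the maximal length of an expression of l matching t (0 if none matches)
def pvM (t : String) (l : List (String × String)) : Int :=
  l.foldr (fun p m => if PySem.Str.isIn p.1 t then max (PySem.Str.len p.1) m else m) 0

theorem pvM_nonneg (t : String) (l : List (String × String)) : 0 ≤ pvM t l := by
  induction l with
  | nil => simp [pvM]
  | cons p l ih =>
    simp only [pvM, List.foldr_cons] at *
    split_ifs
    · have : (0:Int) ≤ PySem.Str.len p.1 := by simp [PySem.Str.len]
      omega
    · exact ih

-- A's loop, characterized: final length is max n (pvM t l); final value is the value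
-- of the first expression of maximal length that matches, unless nothing beats n.
theorem pv_loopA (t : String) (l : List (String × String)) (b : Option String) (n : Int)
    (hn : 0 ≤ n) :
    l.foldl (fun (st : Option String × Int) p =>
        if PySem.Str.isIn p.1 t ∧ st.2 < PySem.Str.len p.1
        then (some p.2, PySem.Str.len p.1) else st) (b, n)
    = (if n < pvM t l
        then (l.find? (fun p => PySem.Str.len p.1 == pvM t l && PySem.Str.isIn p.1 t)).map (fun p => p.2)
        else b,
       max n (pvM t l)) := by
  induction l generalizing b n with
  | nil =>
    have h0 : pvM t [] = 0 := rfl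
    simp only [List.foldl_nil, h0]
    rw [if_neg (by omega)]
    simp only [Prod.mk.injEq]
    exact ⟨trivial, by omega⟩
  | cons p l ih =>
    have hM := pvM_nonneg t l
    have hlen : (0:Int) ≤ PySem.Str.len p.1 := by simp [PySem.Str.len]
    simp only [List.foldl_cons]
    by_cases hm : PySem.Str.isIn p.1 t
    · have hMc : pvM t (p :: l) = max (PySem.Str.len p.1) (pvM t l) := by
        unfold pvM
        rw [List.foldr_cons, if_pos hm]
      by_cases hgt : n < PySem.Str.len p.1
      · rw [if_pos ⟨hm, hgt⟩, ih _ _ hlen]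
        by_cases hle : pvM t l ≤ PySem.Str.len p.1
        · have h2 : pvM t (p :: l) = PySem.Str.len p.1 := by omega
          rw [if_neg (by omega),
              List.find?_cons_of_pos (by rw [h2, hm, Bool.and_true, beq_self_eq_true]),
              if_pos (by omega)]
          simp only [Option.map_some, Prod.mk.injEq]
          exact ⟨trivial, by omega⟩
        · have h2 : pvM t (p :: l) = pvM t l := by omega
          rw [if_pos (by omega), h2,
              List.find?_cons_of_neg (by
                intro hc
                simp only [Bool.and_eq_true, beq_iff_eq] at hc
                obtain ⟨h1, -⟩ := hc
                omega),
              if_pos (by omega)]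
          simp only [Prod.mk.injEq]
          exact ⟨trivial, by omega⟩
      · rw [if_neg (by tauto), ih _ _ hn]
        by_cases hlt : n < pvM t l
        · have h2 : pvM t (p :: l) = pvM t l := by omega
          rw [if_pos hlt, h2,
              List.find?_cons_of_neg (by
                intro hc
                simp only [Bool.and_eq_true, beq_iff_eq] at hc
                obtain ⟨h1, -⟩ := hc
                omega),
              if_pos hlt]
        · rw [if_neg hlt, if_neg (by omega)]
          simp only [Prod.mk.injEq]
          exact ⟨trivial, by omega⟩
    · have hm' : PySem.Str.isIn p.1 t = false := by
        rw [← Bool.not_eq_true]; exact hm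
      have hMc : pvM t (p :: l) = pvM t l := by
        unfold pvM
        rw [List.foldr_cons, if_neg (by rw [hm']; exact Bool.false_ne_true)]
      rw [if_neg (by tauto), ih _ _ hn, hMc,
          List.find?_cons_of_neg (by rw [hm', Bool.and_false]; exact Bool.false_ne_true)]

theorem pv_max?_step (a x : Int) (ys : List Int) :
    PySem.List.max? (a :: x :: ys) id = PySem.List.max? (max a x :: ys) id := by
  simp only [PySem.List.max?, List.foldl_cons, id]
  split_ifs with h
  · rw [max_eq_right h.le]
  · rw [max_eq_left (by omega)]

theorem pv_max?_cons (ys : List Int) : ∀ (a : Int),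
    PySem.List.max? (a :: ys) id = some (ys.foldl max a) := by
  induction ys with
  | nil => intro a; rfl
  | cons x ys ih =>
    intro a
    rw [pv_max?_step a x ys, ih (max a x), List.foldl_cons]

theorem pv_foldl_max (ys : List Int) : ∀ (a : Int), 0 ≤ a → (∀ y ∈ ys, 0 ≤ y) →
    ys.foldl max a = max a (ys.foldr max 0) := by
  induction ys with
  | nil => intro a ha _; simp only [List.foldl_nil, List.foldr_nil]; omega
  | cons y ys ih =>
    intro a ha h
    have hy : 0 ≤ y := h y (by simp)
    simp only [List.foldl_cons, List.foldr_cons]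
    rw [ih (max a y) (by omega) (fun z hz => h z (by simp [hz]))]
    omega

theorem pv_maxD_foldr (ys : List Int) (h : ∀ y ∈ ys, 0 ≤ y) :
    PySem.List.maxD ys id 0 = ys.foldr max 0 := by
  cases ys with
  | nil => rfl
  | cons a ys =>
    have ha : 0 ≤ a := h a (by simp)
    simp only [PySem.List.maxD]
    rw [pv_max?_cons ys a]
    simp only [Option.getD_some]
    rw [pv_foldl_max ys a ha (fun z hz => h z (by simp [hz])), List.foldr_cons]

theorem pv_maxD_eq (t : String) (l : List (String × String)) :
    PySem.List.maxD (((l.map Prod.fst).filter (fun e => PySem.Str.isIn e t)).map PySem.Str.len) id 0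
      = pvM t l := by
  rw [pv_maxD_foldr _ (by
    intro y hy
    simp only [List.mem_map, List.mem_filter] at hy
    obtain ⟨e, _, rfl⟩ := hy
    simp [PySem.Str.len])]
  induction l with
  | nil => rfl
  | cons p l ih =>
    simp only [List.map_cons, List.filter_cons]
    by_cases hm : PySem.Str.isIn p.1 t
    · rw [if_pos hm, List.map_cons, List.foldr_cons, ih]
      unfold pvM
      rw [List.foldr_cons, if_pos hm]
    · rw [Bool.not_eq_true] at hm
      rw [if_neg (by rw [hm]; exact Bool.false_ne_true), ih]
      unfold pvM
      rw [List.foldr_cons, if_neg (by rw [hm]; exact Bool.false_ne_true)]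
-- ===== VERDICT (by name: the statement is the Claim_ definition above) =====
theorem buscar_expresion_py_spec : Claim_equal_buscar_expresion_py := by
  intro texto expresiones _
  unfold Spec_buscar_expresion_py buscar_expresion_py buscar_expresion_py_alt
  dsimp only
  have hkeys : (PySem.Dict.ofList expresiones).keys
      = (PySem.Dict.ofList expresiones).items.map Prod.fst := rfl
  set t := PySem.Str.lower texto with ht
  set l := (PySem.Dict.ofList expresiones).items with hl
  rw [hkeys, pv_maxD_eq t l, pv_loopA t l none 0 le_rfl]
  have hM := pvM_nonneg t l
  by_cases h0 : pvM t l = 0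
  · simp [h0]
  · have : (0:Int) < pvM t l := lt_of_le_of_ne hM (Ne.symm h0)
    simp [h0, this]
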